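-- pv_equiv track=rewrite | github.com/FPannach/Fanfiction_Annotation_Project | src/count_modes_of_demise.py | count_descendants
-- ===== SOURCE A (Python) =====
-- def count_descendants(concepts, root_id):
--     """
--     Counts all direct and indirect narrower concepts for a given root_id.
--     """
--     # Build a true 'children' map as 'narrower' is not always explicit for all concepts
--     children_map = {cid: [] for cid in concepts}
--     for cid, data in concepts.items():
--         for broader_id in data.get('broader', []):
--             if broader_id in children_map:
--                 children_map[broader_id].append(cid)
--
--     descendants = set()
--     to_visit = [root_id]
--
--     while to_visit:
--         current_id = to_visit.pop(0)
--
--         # Add to descendants if not the root itself and not already counted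
--         if current_id != root_id and current_id not in descendants:
--             descendants.add(current_id)
--
--         # Add children to the list to visit
--         for child_id in children_map.get(current_id, []):
--             if child_id not in descendants: # Prevent cycles and redundant visits
--                 to_visit.append(child_id)
--
--     return len(descendants)
-- ===== SOURCE B (Python) =====
-- def count_descendants(concepts, root_id):
--     """
--     Counts all direct and indirect narrower concepts for a given root_id.
--     Iterative DFS with a visited set checked at push time (no duplicate
--     stack entries) and a running counter instead of len(set).
--     """
--     children = {}
--     for cid, data in concepts.items():
--         for broader_id in data.get('broader', []):
--             if broader_id in concepts:
--                 children.setdefault(broader_id, []).append(cid)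
--
--     visited = {root_id}
--     stack = [root_id]
--     count = 0
--     while stack:
--         cur = stack.pop()
--         for child_id in children.get(cur, []):
--             if child_id not in visited:
--                 visited.add(child_id)
--                 count += 1
--                 stack.append(child_id)
--     return count
-- ===== Notes on version B (the rewrite author's own statement) =====
-- stated objective: alternative
-- what changed: Replaces A's FIFO worklist that pops from the front with list.pop(0) and allows duplicate queue entries (re-popped nodes rescan their children) by an iterative DFS stack whose visited set is checked at push time, counting with an integer instead of len(set); the children map is built on demand with setdefault instead of pre-initialising every key.
-- outside the precondition, e.g. on count_descendants({'r': {'broader': ['r']}}, 'r'): A does not finish within the time limit, B returns 0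
import Mathlib
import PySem

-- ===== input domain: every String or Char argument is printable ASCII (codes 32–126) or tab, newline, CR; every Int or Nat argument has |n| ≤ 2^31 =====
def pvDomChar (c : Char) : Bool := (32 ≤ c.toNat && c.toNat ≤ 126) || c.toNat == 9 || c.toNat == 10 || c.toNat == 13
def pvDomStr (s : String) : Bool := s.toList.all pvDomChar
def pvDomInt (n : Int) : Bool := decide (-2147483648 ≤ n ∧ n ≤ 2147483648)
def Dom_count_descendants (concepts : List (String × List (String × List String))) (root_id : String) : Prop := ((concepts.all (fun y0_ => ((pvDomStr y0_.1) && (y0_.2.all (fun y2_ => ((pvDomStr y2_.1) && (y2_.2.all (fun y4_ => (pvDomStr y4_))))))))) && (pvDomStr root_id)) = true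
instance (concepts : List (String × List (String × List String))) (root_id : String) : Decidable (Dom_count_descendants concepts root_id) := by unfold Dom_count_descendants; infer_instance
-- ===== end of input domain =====

-- B replaces A's BFS worklist (list.pop(0), duplicate queue entries) by a DFS stack with a
-- visited set checked at push time and an integer counter (objective: alternative).

-- data.get('broader', []) — used verbatim by both Pythons
def pvBroader (data : List (String × List String)) : List String :=
  (PySem.Dict.mk data).getD "broader" []

-- ── helpers the ports' own termination proofs cite (decreasing_by) ──
-- number of elements of ys not yet in s (the worklist loops strictly shrink it)
def pvUnseen (ys s : List String) : Nat := (ys.filter (fun y => decide (y ∉ s))).length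

lemma pvUnseen_mono (ys s s' : List String) (h : ∀ y ∈ s, y ∈ s') :
    pvUnseen ys s' ≤ pvUnseen ys s := by
  induction ys with
  | nil => simp [pvUnseen]
  | cons a t ih =>
    by_cases h1 : a ∈ s'
    · by_cases h2 : a ∈ s <;> simp [pvUnseen, h1, h2] at ih ⊢ <;> omega
    · have h2 : a ∉ s := fun hm => h1 (h a hm)
      simp [pvUnseen, h1, h2] at ih ⊢; omega

lemma pvUnseen_lt (ys s s' : List String) (x : String) (hx : x ∈ ys) (hxs : x ∉ s)
    (hxs' : x ∈ s') (h : ∀ y ∈ s, y ∈ s') : pvUnseen ys s' < pvUnseen ys s := by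
  induction ys with
  | nil => cases hx
  | cons a t ih =>
    rcases List.mem_cons.mp hx with rfl | hx'
    · have hm := pvUnseen_mono t s s' h
      simp [pvUnseen, hxs, hxs'] at hm ⊢; omega
    · have hm := ih hx'
      by_cases h1 : a ∈ s'
      · by_cases h2 : a ∈ s <;> simp [pvUnseen, h1, h2] at hm ⊢ <;> omega
      · have h2 : a ∉ s := fun hmm => h1 (h a hmm)
        simp [pvUnseen, h1, h2] at hm ⊢; omega

lemma pvLen_le_flatten (L : List (List String)) (v : List String) (hv : v ∈ L) :
    v.length ≤ L.flatten.length := by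
  rw [List.length_flatten]
  exact List.single_le_sum (fun _ _ => Nat.zero_le _) _ (List.mem_map_of_mem hv)

lemma pvGetD_mem_values (d : PySem.Dict String (List String)) (k : String) :
    d.getD k [] = [] ∨ d.getD k [] ∈ d.values := by
  rw [PySem.Dict.getD_eq_get?_getD]
  cases hg : d.get? k with
  | none => exact Or.inl rfl
  | some v =>
    right
    have hm := PySem.Dict.mem_items_of_get?_eq_some d hg
    simpa [PySem.Dict.values] using List.mem_map_of_mem (f := Prod.snd) hm

lemma pvGetD_len_le (d : PySem.Dict String (List String)) (k : String) :
    (d.getD k []).length ≤ d.values.flatten.length := by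
  rcases pvGetD_mem_values d k with h | h
  · simp [h]
  · exact pvLen_le_flatten _ _ h

lemma pvGetD_sub_flatten (d : PySem.Dict String (List String)) (k : String) :
    ∀ x ∈ d.getD k [], x ∈ d.values.flatten := by
  intro x hx
  rcases pvGetD_mem_values d k with h | h
  · rw [h] at hx; cases hx
  · exact List.mem_flatten.mpr ⟨_, h, hx⟩

-- weight of a queue entry in A's BFS (re-popped already-counted nodes are heavy, root is medium)
def pvW (E : Nat) (root : String) (desc : List String) (x : String) : Nat :=
  if x ∈ desc then E * E + E + 1 else if x = root then E + 1 else 1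

-- 'for ch in l: if P ch: q.append(ch)' is q ++ filter
lemma pvFoldAppend (P : String → Prop) [DecidablePred P] (l acc : List String) :
    l.foldl (fun q ch => if P ch then q ++ [ch] else q) acc
      = acc ++ l.filter (fun ch => decide (P ch)) := by
  induction l generalizing acc with
  | nil => simp
  | cons a t ih =>
    by_cases hp : P a <;> simp [hp, ih, List.append_assoc]

lemma pvSum_le (l : List String) (w : String → Nat) (B : Nat) (h : ∀ x ∈ l, w x ≤ B) :
    (l.map w).sum ≤ l.length * B := by
  have := List.sum_le_card_nsmul (l.map w) B (by simpa using h)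
  simpa [smul_eq_mul] using this

-- ===== PORT A =====
def pvChildrenA (concepts : List (String × List (String × List String))) :
    PySem.Dict String (List String) :=
  concepts.foldl
    (fun d p =>
      (pvBroader p.2).foldl
        (fun d b => if d.contains b then d.modify b [] (fun l => l ++ [p.1]) else d) d)
    (concepts.foldl (fun d p => d.insert p.1 ([] : List String)) PySem.Dict.empty)

-- A's while loop; the hroot/hq arguments only feed the termination proof (Python's loop
-- runs forever when root is its own child — exactly what Pre_ excludes)
def pvLoopA (children : PySem.Dict String (List String)) (root : String)
    (hroot : root ∉ children.getD root []) (desc : PySem.Set String) (queue : List String)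
    (hq : ∀ x ∈ queue, x = root ∨ x ∈ children.values.flatten) : PySem.Set String :=
  match queue with
  | [] => desc
  | cur :: rest =>
    let desc' : PySem.Set String :=
      if cur ≠ root ∧ cur ∉ desc then PySem.Set.add desc cur else desc
    pvLoopA children root hroot desc'
      ((children.getD cur []).foldl (fun q ch => if ch ∉ desc' then q ++ [ch] else q) rest)
      (by
        intro x hx
        rw [pvFoldAppend] at hx
        rcases List.mem_append.mp hx with h | h
        · exact hq x (List.mem_cons_of_mem _ h)
        · exact Or.inr (pvGetD_sub_flatten children cur x (List.mem_of_mem_filter h)))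
termination_by
  (pvUnseen children.values.flatten desc,
   (queue.map (pvW children.values.flatten.length root desc)).sum)
decreasing_by
  simp only [dite_eq_ite]
  by_cases hadd : cur ≠ root ∧ cur ∉ desc
  · apply Prod.Lex.left
    have hcur : cur ∈ children.values.flatten := by
      rcases hq cur List.mem_cons_self with h | h
      · exact absurd h hadd.1
      · exact h
    refine pvUnseen_lt _ desc _ cur hcur hadd.2 ?_ ?_
    · rw [if_pos hadd]
      exact (PySem.Set.mem_add desc cur cur).mpr (Or.inr rfl)
    · intro y hy
      rw [if_pos hadd]
      exact (PySem.Set.mem_add desc cur y).mpr (Or.inl hy)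
  · simp only [if_neg hadd]
    apply Prod.Lex.right
    rw [pvFoldAppend, List.map_append, List.sum_append, List.map_cons, List.sum_cons]
    set E := children.values.flatten.length
    set fl := (children.getD cur []).filter (fun ch => decide (ch ∉ desc))
    have hlen : fl.length ≤ E :=
      le_trans (List.length_filter_le _ _) (pvGetD_len_le children cur)
    have hnot : ∀ x ∈ fl, x ∉ desc := by
      intro x hx
      simpa using List.of_mem_filter hx
    have hbound : (fl.map (pvW E root desc)).sum < pvW E root desc cur := by
      by_cases hc : cur ∈ desc
      · have h1 : ∀ x ∈ fl, pvW E root desc x ≤ E + 1 := by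
          intro x hx
          simp only [pvW, if_neg (hnot x hx)]
          split <;> omega
        have := pvSum_le fl (pvW E root desc) (E + 1) h1
        have h2 : fl.length * (E + 1) ≤ E * (E + 1) := Nat.mul_le_mul_right _ hlen
        simp only [pvW, if_pos hc]
        nlinarith
      · have hcr : cur = root := by
          by_cases h : cur = root
          · exact h
          · exact absurd ⟨h, hc⟩ hadd
        have h1 : ∀ x ∈ fl, pvW E root desc x ≤ 1 := by
          intro x hx
          have hxr : x ≠ root := by
            intro hx'
            subst hx' hcr
            exact hroot (List.mem_of_mem_filter hx)
          simp [pvW, hnot x hx, hxr]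
        have := pvSum_le fl (pvW E root desc) 1 h1
        simp only [pvW, if_neg hc, if_pos hcr]
        omega
    omega

def count_descendants (concepts : List (String × List (String × List String)))
    (root_id : String) : Int :=
  -- dite only makes the recursion total: under Pre_ the guard is False (Python A diverges there)
  if hroot : root_id ∈ (pvChildrenA concepts).getD root_id [] then 0
  else
    PySem.Set.len (pvLoopA (pvChildrenA concepts) root_id hroot PySem.Set.empty [root_id]
      (by intro x hx; left; simpa using hx))

-- ===== PORT B =====
-- the body of B's inner 'for child_id in …' loop (state: visited, stack, count)
def pvStepB (st : PySem.Set String × List String × Int) (ch : String) :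
    PySem.Set String × List String × Int :=
  if ch ∉ st.1 then (PySem.Set.add st.1 ch, ch :: st.2.1, st.2.2 + 1) else st

lemma pvStepB_foldl_mono (l : List String) (st : PySem.Set String × List String × Int) :
    ∀ y ∈ st.1, y ∈ (l.foldl pvStepB st).1 := by
  induction l generalizing st with
  | nil => intro y hy; exact hy
  | cons a t ih =>
    intro y hy
    apply ih
    simp only [pvStepB]
    split
    · exact (PySem.Set.mem_add st.1 a y).mpr (Or.inl hy)
    · exact hy

lemma pvStepB_foldl_cases (l : List String) (st : PySem.Set String × List String × Int) :
    (l.foldl pvStepB st) = st ∨ ∃ x ∈ l, x ∉ st.1 ∧ x ∈ (l.foldl pvStepB st).1 := by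
  induction l generalizing st with
  | nil => exact Or.inl rfl
  | cons a t ih =>
    by_cases ha : a ∉ st.1
    · right
      refine ⟨a, List.mem_cons_self, ha, ?_⟩
      simp only [List.foldl_cons]
      apply pvStepB_foldl_mono
      simp only [pvStepB, if_pos ha]
      exact (PySem.Set.mem_add st.1 a a).mpr (Or.inr rfl)
    · simp only [List.foldl_cons, pvStepB, if_neg ha]
      rcases ih st with h | ⟨x, hx, hx1, hx2⟩
      · exact Or.inl h
      · exact Or.inr ⟨x, List.mem_cons_of_mem _ hx, hx1, hx2⟩

-- B's while loop over the explicit DFS stack (Lean list head = Python stack top)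
def pvLoopB (children : PySem.Dict String (List String))
    (visited : PySem.Set String) (stack : List String) (count : Int) :
    PySem.Set String × Int :=
  match stack with
  | [] => (visited, count)
  | cur :: rest =>
    let st := (children.getD cur []).foldl pvStepB (visited, rest, count)
    pvLoopB children st.1 st.2.1 st.2.2
termination_by (pvUnseen children.values.flatten visited, stack.length)
decreasing_by
  rcases pvStepB_foldl_cases (children.getD cur []) (visited, rest, count) with h | ⟨x, hx, hx1, hx2⟩
  · rw [h]
    exact Prod.Lex.right _ (by simp)
  · apply Prod.Lex.left
    exact pvUnseen_lt _ visited _ x (pvGetD_sub_flatten children cur x hx) hx1 hx2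
      (pvStepB_foldl_mono (children.getD cur []) (visited, rest, count))

def pvChildrenB (concepts : List (String × List (String × List String))) :
    PySem.Dict String (List String) :=
  concepts.foldl
    (fun d p =>
      (pvBroader p.2).foldl
        (fun d b =>
          if concepts.any (fun q => q.1 == b) then d.modify b [] (fun l => l ++ [p.1]) else d) d)
    PySem.Dict.empty

def count_descendants_alt (concepts : List (String × List (String × List String)))
    (root_id : String) : Int :=
  (pvLoopB (pvChildrenB concepts) (PySem.Set.ofList [root_id]) [root_id] 0).2

-- ===== PRECONDITION & SPEC =====
-- Pre_ excludes exactly the inputs where root_id lists itself under 'broader': there Python A's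
-- queue re-enqueues root_id forever (the loop never terminates), so A returns no value.
def Pre_count_descendants (concepts : List (String × List (String × List String))) (root_id : String) : Prop :=
  ∀ p ∈ concepts, p.1 = root_id → root_id ∉ (PySem.Dict.mk p.2).getD "broader" []
instance (concepts : List (String × List (String × List String))) (root_id : String) : Decidable (Pre_count_descendants concepts root_id) := by unfold Pre_count_descendants; infer_instance

def pvWitness_count_descendants : (List (String × List (String × List String))) × String :=
  ([("a", [("broader", [])]), ("b", [("broader", ["a"])]), ("c", [("broader", ["b"])])], "a")

def Spec_count_descendants (concepts : List (String × List (String × List String))) (root_id : String) (out : Int) : Prop := out = count_descendants_alt concepts root_id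
instance (concepts : List (String × List (String × List String))) (root_id : String) (out : Int) : Decidable (Spec_count_descendants concepts root_id out) := by unfold Spec_count_descendants; infer_instance

-- ===== CLAIM (what is proved, stated in full; the proofs are below) =====
def Claim_equal_count_descendants : Prop := ∀ (concepts : List (String × List (String × List String))) (root_id : String), Dom_count_descendants concepts root_id → Pre_count_descendants concepts root_id → Spec_count_descendants concepts root_id (count_descendants concepts root_id)

-- ===== LEMMAS AND PROOFS =====

-- 'b in concepts' / 'b in children_map' (their key sets agree)
def pvKey (concepts : List (String × List (String × List String))) (b : String) : Bool :=
  concepts.any (fun q => q.1 == b)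

-- the children list both builds produce for key k
def pvEdges (concepts : List (String × List (String × List String))) (k : String) :
    List String :=
  if pvKey concepts k then
    concepts.flatMap (fun p => List.replicate ((pvBroader p.2).count k) p.1)
  else []

lemma pvInnerB (c : String → Bool) (cid : String) (bs : List String)
    (d : PySem.Dict String (List String)) (k : String) :
    (bs.foldl (fun d b => if c b then d.modify b [] (fun l => l ++ [cid]) else d) d).getD k []
      = d.getD k [] ++ (if c k then List.replicate (bs.count k) cid else []) := by
  induction bs generalizing d with
  | nil => simp
  | cons b bs ih =>
    simp only [List.foldl_cons]
    rw [ih]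
    by_cases hcb : c b = true
    · simp only [hcb, if_true]
      rw [PySem.Dict.getD_modify]
      by_cases hkb : k = b
      · subst hkb
        simp [hcb, List.count_cons_self, List.replicate_succ, List.append_assoc]
      · have : b ≠ k := fun h => hkb h.symm
        simp [hkb, List.count_cons_of_ne this]
    · simp only [Bool.not_eq_true] at hcb
      simp only [hcb, Bool.false_eq_true, if_false]
      by_cases hkb : k = b
      · subst hkb; simp [hcb]
      · have : b ≠ k := fun h => hkb h.symm
        simp [List.count_cons_of_ne this]

lemma pvOuterB (c : String → Bool) (l : List (String × List (String × List String)))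
    (d : PySem.Dict String (List String)) (k : String) :
    (l.foldl (fun d p =>
        (pvBroader p.2).foldl
          (fun d b => if c b then d.modify b [] (fun l2 => l2 ++ [p.1]) else d) d) d).getD k []
      = d.getD k []
        ++ (if c k then l.flatMap (fun p => List.replicate ((pvBroader p.2).count k) p.1)
            else []) := by
  induction l generalizing d with
  | nil => simp
  | cons p l ih =>
    simp only [List.foldl_cons]
    rw [ih, pvInnerB]
    by_cases hck : c k = true <;> simp [hck, List.append_assoc]

lemma pvChildrenB_getD (concepts : List (String × List (String × List String))) (k : String) :
    (pvChildrenB concepts).getD k [] = pvEdges concepts k := by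
  unfold pvChildrenB pvEdges pvKey
  rw [pvOuterB]
  simp [PySem.Dict.getD_empty]

lemma pvInnerA (c : String → Bool) (cid : String) (bs : List String)
    (dA dB : PySem.Dict String (List String))
    (hc : ∀ b, dA.contains b = c b) (he : ∀ k, dA.getD k [] = dB.getD k []) :
    (∀ b, (bs.foldl (fun d b => if d.contains b then d.modify b [] (fun l => l ++ [cid]) else d) dA).contains b = c b)
    ∧ (∀ k, (bs.foldl (fun d b => if d.contains b then d.modify b [] (fun l => l ++ [cid]) else d) dA).getD k []
        = (bs.foldl (fun d b => if c b then d.modify b [] (fun l => l ++ [cid]) else d) dB).getD k []) := by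
  induction bs generalizing dA dB with
  | nil => exact ⟨hc, he⟩
  | cons b bs ih =>
    simp only [List.foldl_cons, hc b]
    by_cases hcb : c b = true
    · simp only [hcb, if_true]
      apply ih
      · intro b'
        rw [PySem.Dict.contains_modify]
        by_cases hb' : b' = b
        · subst hb'; simp [hcb]
        · simp [hb', hc b']
      · intro k
        rw [PySem.Dict.getD_modify, PySem.Dict.getD_modify]
        by_cases hkb : k = b <;> simp [hkb, he k, he b]
    · simp only [Bool.not_eq_true] at hcb
      simp only [hcb, Bool.false_eq_true, if_false]
      exact ih dA dB hc he

lemma pvOuterA (c : String → Bool) (l : List (String × List (String × List String)))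
    (dA dB : PySem.Dict String (List String))
    (hc : ∀ b, dA.contains b = c b) (he : ∀ k, dA.getD k [] = dB.getD k []) :
    ∀ k, (l.foldl (fun d p =>
        (pvBroader p.2).foldl
          (fun d b => if d.contains b then d.modify b [] (fun l2 => l2 ++ [p.1]) else d) d) dA).getD k []
      = (l.foldl (fun d p =>
        (pvBroader p.2).foldl
          (fun d b => if c b then d.modify b [] (fun l2 => l2 ++ [p.1]) else d) d) dB).getD k [] := by
  induction l generalizing dA dB with
  | nil => exact he
  | cons p l ih =>
    simp only [List.foldl_cons]
    obtain ⟨hc', he'⟩ := pvInnerA c p.1 (pvBroader p.2) dA dB hc he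
    exact ih _ _ hc' he'

lemma pvInitA_contains (l : List (String × List (String × List String)))
    (d : PySem.Dict String (List String)) (b : String) :
    (l.foldl (fun d p => d.insert p.1 ([] : List String)) d).contains b
      = (d.contains b || l.any (fun q => q.1 == b)) := by
  induction l generalizing d with
  | nil => simp
  | cons p l ih =>
    simp only [List.foldl_cons, List.any_cons]
    rw [ih, PySem.Dict.contains_insert]
    by_cases h : p.1 = b
    · simp [h]
    · have h2 : (b == p.1) = false := beq_eq_false_iff_ne.mpr (fun hh => h hh.symm)
      have h3 : (p.1 == b) = false := beq_eq_false_iff_ne.mpr h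
      rw [h2, h3]
      simp

lemma pvInitA_getD (l : List (String × List (String × List String)))
    (d : PySem.Dict String (List String)) (hd : ∀ k, d.getD k [] = [])
    (k : String) :
    (l.foldl (fun d p => d.insert p.1 ([] : List String)) d).getD k [] = [] := by
  induction l generalizing d with
  | nil => exact hd k
  | cons p l ih =>
    simp only [List.foldl_cons]
    apply ih
    intro k'
    rw [PySem.Dict.getD_insert]
    by_cases h : k' = p.1 <;> simp [h, hd k']

lemma pvChildrenA_getD (concepts : List (String × List (String × List String))) (k : String) :
    (pvChildrenA concepts).getD k [] = pvEdges concepts k := by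
  unfold pvChildrenA
  rw [pvOuterA (fun b => concepts.any (fun q => q.1 == b)) concepts _ PySem.Dict.empty]
  · rw [← pvChildrenB_getD]
    rfl
  · intro b
    rw [pvInitA_contains]
    simp
  · intro k'
    rw [pvInitA_getD]
    · simp [PySem.Dict.getD_empty]
    · intro k''; simp [PySem.Dict.getD_empty]

lemma pvEdges_mem (concepts : List (String × List (String × List String))) (k x : String) :
    x ∈ pvEdges concepts k
      ↔ (pvKey concepts k = true ∧ ∃ p ∈ concepts, p.1 = x ∧ k ∈ pvBroader p.2) := by
  unfold pvEdges
  by_cases h : pvKey concepts k = true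
  · simp only [h, if_true, true_and, List.mem_flatMap, List.mem_replicate]
    constructor
    · rintro ⟨p, hp, hn, rfl⟩
      exact ⟨p, hp, rfl, List.count_pos_iff.mp (Nat.pos_of_ne_zero hn)⟩
    · rintro ⟨p, hp, rfl, hk⟩
      exact ⟨p, hp, Nat.pos_iff_ne_zero.mp (List.count_pos_iff.mpr hk), rfl⟩
  · simp [h]

-- reachability along the children map, from root
def pvStepRel (children : PySem.Dict String (List String)) (a b : String) : Prop :=
  b ∈ children.getD a []

def pvReach (children : PySem.Dict String (List String)) (root x : String) : Prop :=
  Relation.ReflTransGen (pvStepRel children) root x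

lemma pvReach_congr (d d' : PySem.Dict String (List String))
    (h : ∀ k, d.getD k [] = d'.getD k []) (root x : String) :
    pvReach d root x ↔ pvReach d' root x := by
  constructor
  · exact Relation.ReflTransGen.mono (fun a b hb => by
      unfold pvStepRel at *; rw [← h a]; exact hb)
  · exact Relation.ReflTransGen.mono (fun a b hb => by
      unfold pvStepRel at *; rw [h a]; exact hb)

lemma pvLoopA_mem (children : PySem.Dict String (List String)) (root : String)
    (hroot : root ∉ children.getD root []) (desc : PySem.Set String) (queue : List String)
    (hq : ∀ x ∈ queue, x = root ∨ x ∈ children.values.flatten)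
    (hd : ∀ x ∈ desc, pvReach children root x ∧ x ≠ root)
    (hqr : ∀ x ∈ queue, pvReach children root x)
    (hcl : ∀ v, (v ∈ desc ∨ v = root) →
      v ∈ queue ∨ ∀ ch ∈ children.getD v [], (ch ∈ desc ∨ ch ∈ queue ∨ ch = root)) :
    ∀ x, x ∈ pvLoopA children root hroot desc queue hq
      ↔ (pvReach children root x ∧ x ≠ root) := by
  revert hd hqr hcl
  fun_induction pvLoopA children root hroot desc queue hq with
  | case1 desc hq1 hq2 =>
    intro hd hqr hcl x
    constructor
    · exact hd x
    · have key : ∀ y, pvReach children root y → y ∈ desc ∨ y = root := by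
        intro y hy
        induction hy with
        | refl => exact Or.inr rfl
        | tail hab hbc ihb =>
          rename_i b c
          rcases hcl b ihb with h | h
          · cases h
          · rcases h c hbc with h' | h' | h'
            · exact Or.inl h'
            · cases h'
            · exact Or.inr h'
      rintro ⟨hrx, hne⟩
      exact (key x hrx).resolve_right hne
  | case2 desc cur rest hq1 desc' hq2 ih =>
    intro hd hqr hcl
    simp only [dite_eq_ite] at ih
    have hcurR : pvReach children root cur := hqr cur List.mem_cons_self
    have hmemD : ∀ y, y ∈ desc' ↔ y ∈ desc ∨ ((cur ≠ root ∧ cur ∉ desc) ∧ y = cur) := by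
      intro y
      show y ∈ (if h : cur ≠ root ∧ cur ∉ desc then PySem.Set.add desc cur else desc) ↔ _
      by_cases hadd : cur ≠ root ∧ cur ∉ desc
      · rw [dif_pos hadd, PySem.Set.mem_add]
        tauto
      · rw [dif_neg hadd]
        tauto
    have hmemQ : ∀ y, y ∈ (List.foldl (fun q ch => if ch ∉ desc' then q ++ [ch] else q) rest
        (children.getD cur []))
        ↔ y ∈ rest ∨ (y ∈ children.getD cur [] ∧ y ∉ desc') := by
      intro y
      rw [pvFoldAppend (fun ch => ch ∉ desc')]
      simp [List.mem_filter]
    have hcurstat : cur ∈ desc' ∨ cur = root := by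
      by_cases hadd : cur ≠ root ∧ cur ∉ desc
      · exact Or.inl ((hmemD cur).mpr (Or.inr ⟨hadd, rfl⟩))
      · by_cases hcr : cur = root
        · exact Or.inr hcr
        · have hmem : cur ∈ desc := by
            by_contra hnm
            exact hadd ⟨hcr, hnm⟩
          exact Or.inl ((hmemD cur).mpr (Or.inl hmem))
    apply ih
    · intro x hx
      rcases (hmemD x).mp hx with h | ⟨hadd, rfl⟩
      · exact hd x h
      · exact ⟨hcurR, hadd.1⟩
    · intro x hx
      rcases (hmemQ x).mp hx with h | ⟨h1, _⟩
      · exact hqr x (List.mem_cons_of_mem _ h)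
      · exact Relation.ReflTransGen.tail hcurR h1
    · intro v hv
      have hRight : ∀ ch ∈ children.getD cur [],
          ch ∈ desc' ∨ ch ∈ (List.foldl (fun q ch => if ch ∉ desc' then q ++ [ch] else q) rest
            (children.getD cur [])) ∨ ch = root := by
        intro ch hch
        by_cases hmem : ch ∈ desc'
        · exact Or.inl hmem
        · exact Or.inr (Or.inl ((hmemQ ch).mpr (Or.inr ⟨hch, hmem⟩)))
      have hLift : ∀ w : String, (∀ ch ∈ children.getD w [], ch ∈ desc ∨ ch ∈ cur :: rest ∨ ch = root) →
          ∀ ch ∈ children.getD w [],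
            ch ∈ desc' ∨ ch ∈ (List.foldl (fun q ch => if ch ∉ desc' then q ++ [ch] else q) rest
              (children.getD cur [])) ∨ ch = root := by
        intro w hcov ch hch
        rcases hcov ch hch with h | h | h
        · exact Or.inl ((hmemD ch).mpr (Or.inl h))
        · rcases List.mem_cons.mp h with rfl | hr2
          · rcases hcurstat with h' | h'
            · exact Or.inl h'
            · exact Or.inr (Or.inr h')
          · exact Or.inr (Or.inl ((hmemQ ch).mpr (Or.inl hr2)))
        · exact Or.inr (Or.inr h)
      have hOld : v ∈ desc ∨ v = root →
          (v ∈ cur :: rest ∨ ∀ ch ∈ children.getD v [],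
            ch ∈ desc' ∨ ch ∈ (List.foldl (fun q ch => if ch ∉ desc' then q ++ [ch] else q) rest
              (children.getD cur [])) ∨ ch = root) := by
        intro hv'
        rcases hcl v hv' with hvq | hcov
        · exact Or.inl hvq
        · exact Or.inr (hLift v hcov)
      rcases hv with hvD | rfl
      · rcases (hmemD v).mp hvD with hvdesc | ⟨_, rfl⟩
        · rcases hOld (Or.inl hvdesc) with hvq | hcov
          · rcases List.mem_cons.mp hvq with rfl | hvrest
            · exact Or.inr hRight
            · exact Or.inl ((hmemQ v).mpr (Or.inl hvrest))
          · exact Or.inr hcov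
        · exact Or.inr hRight
      · rcases hOld (Or.inr rfl) with hvq | hcov
        · rcases List.mem_cons.mp hvq with heq | hvrest
          · exact Or.inr (heq ▸ hRight)
          · exact Or.inl ((hmemQ v).mpr (Or.inl hvrest))
        · exact Or.inr hcov

lemma pvLoopA_nodup (children : PySem.Dict String (List String)) (root : String)
    (hroot : root ∉ children.getD root []) (desc : PySem.Set String) (queue : List String)
    (hq : ∀ x ∈ queue, x = root ∨ x ∈ children.values.flatten)
    (hnd : desc.Nodup) : (pvLoopA children root hroot desc queue hq).Nodup := by
  revert hnd
  fun_induction pvLoopA children root hroot desc queue hq with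
  | case1 desc hq1 hq2 => exact fun hnd => hnd
  | case2 desc cur rest hq1 desc' hq2 ih =>
    intro hnd
    simp only [dite_eq_ite] at ih
    apply ih
    show List.Nodup (if h : cur ≠ root ∧ cur ∉ desc then PySem.Set.add desc cur else desc)
    by_cases hadd : cur ≠ root ∧ cur ∉ desc
    · rw [dif_pos hadd]
      exact PySem.Set.nodup_add _ _ hnd
    · rw [dif_neg hadd]
      exact hnd

lemma pvStepB_foldl_visited (l : List String) (st : PySem.Set String × List String × Int) :
    ∀ x, x ∈ (l.foldl pvStepB st).1 ↔ x ∈ st.1 ∨ x ∈ l := by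
  induction l generalizing st with
  | nil => intro x; simp
  | cons a t ih =>
    intro x
    simp only [List.foldl_cons, List.mem_cons]
    rw [ih]
    unfold pvStepB
    by_cases ha : a ∈ st.1
    · simp only [ha, not_true_eq_false, if_false]
      constructor
      · rintro (h | h) <;> tauto
      · rintro (h | rfl | h) <;> tauto
    · simp only [ha, not_false_eq_true, if_true]
      simp only [PySem.Set.mem_add]
      tauto

lemma pvStepB_foldl_stack (l : List String) (st : PySem.Set String × List String × Int) :
    ∀ x, x ∈ (l.foldl pvStepB st).2.1 ↔ x ∈ st.2.1 ∨ (x ∈ l ∧ x ∉ st.1) := by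
  induction l generalizing st with
  | nil => intro x; simp
  | cons a t ih =>
    intro x
    simp only [List.foldl_cons, List.mem_cons]
    rw [ih]
    unfold pvStepB
    by_cases ha : a ∈ st.1
    · simp only [ha, not_true_eq_false, if_false]
      constructor
      · rintro (h | ⟨h1, h2⟩) <;> tauto
      · rintro (h | ⟨h1 | h1, h2⟩)
        · tauto
        · subst h1; exact absurd ha h2
        · tauto
    · simp only [ha, not_false_eq_true, if_true]
      simp only [List.mem_cons, PySem.Set.mem_add]
      constructor
      · rintro ((rfl | h) | ⟨h1, h2⟩) <;> tauto
      · rintro (h | ⟨h1 | h1, h2⟩) <;> tauto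

lemma pvStepB_foldl_nodup (l : List String) (st : PySem.Set String × List String × Int)
    (h : st.1.Nodup) : (l.foldl pvStepB st).1.Nodup := by
  induction l generalizing st with
  | nil => exact h
  | cons a t ih =>
    simp only [List.foldl_cons]
    apply ih
    unfold pvStepB
    split
    · exact PySem.Set.nodup_add st.1 a h
    · exact h

lemma pvStepB_foldl_count (l : List String) (st : PySem.Set String × List String × Int) :
    (l.foldl pvStepB st).2.2 + (st.1.length : Int)
      = st.2.2 + ((l.foldl pvStepB st).1.length : Int) := by
  induction l generalizing st with
  | nil => simp
  | cons a t ih =>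
    simp only [List.foldl_cons]
    by_cases ha : a ∈ st.1
    · have : pvStepB st a = st := by unfold pvStepB; simp [ha]
      rw [this]
      exact ih st
    · have hstep : pvStepB st a = (PySem.Set.add st.1 a, a :: st.2.1, st.2.2 + 1) := by
        unfold pvStepB; simp [ha]
      rw [hstep]
      have := ih (PySem.Set.add st.1 a, a :: st.2.1, st.2.2 + 1)
      have hlen : (PySem.Set.add st.1 a).length = st.1.length + 1 := by
        rw [PySem.Set.add_of_not_mem ha]; simp
      simp only [hlen] at this
      push_cast at this ⊢
      omega

lemma pvLoopB_mem (children : PySem.Dict String (List String)) (root : String)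
    (visited : PySem.Set String) (stack : List String) (count : Int)
    (hs : ∀ x ∈ stack, x ∈ visited)
    (hv : ∀ x ∈ visited, pvReach children root x)
    (hr : root ∈ visited)
    (hcl : ∀ v ∈ visited, v ∈ stack ∨ ∀ ch ∈ children.getD v [], ch ∈ visited) :
    ∀ x, x ∈ (pvLoopB children visited stack count).1 ↔ pvReach children root x := by
  revert hs hv hr hcl
  fun_induction pvLoopB children visited stack count with
  | case1 visited count =>
    intro hs hv hr hcl x
    constructor
    · exact hv x
    · intro hrx
      induction hrx with
      | refl => exact hr
      | tail hab hbc ihb =>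
        rename_i b c
        rcases hcl b ihb with h | h
        · cases h
        · exact h c hbc
  | case2 visited count cur rest st ih =>
    intro hs hv hr hcl
    have hst : st = List.foldl pvStepB (visited, rest, count) (children.getD cur []) := rfl
    have hvis : ∀ x, x ∈ st.1 ↔ x ∈ visited ∨ x ∈ children.getD cur [] := by
      intro x; rw [hst]; exact pvStepB_foldl_visited _ _ x
    have hstk : ∀ x, x ∈ st.2.1 ↔ x ∈ rest ∨ (x ∈ children.getD cur [] ∧ x ∉ visited) := by
      intro x; rw [hst]; exact pvStepB_foldl_stack _ _ x
    have hcur : pvReach children root cur := hv cur (hs cur List.mem_cons_self)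
    apply ih
    · intro x hx
      rcases (hstk x).mp hx with h | ⟨h1, _⟩
      · exact (hvis x).mpr (Or.inl (hs x (List.mem_cons_of_mem _ h)))
      · exact (hvis x).mpr (Or.inr h1)
    · intro x hx
      rcases (hvis x).mp hx with h | h
      · exact hv x h
      · exact Relation.ReflTransGen.tail hcur h
    · exact (hvis root).mpr (Or.inl hr)
    · intro v hv'
      by_cases hvv : v ∈ visited
      · rcases hcl v hvv with hst' | hch
        · rcases List.mem_cons.mp hst' with rfl | hrest
          · right; intro ch hch'; exact (hvis ch).mpr (Or.inr hch')
          · left; exact (hstk v).mpr (Or.inl hrest)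
        · right; intro ch hch'; exact (hvis ch).mpr (Or.inl (hch ch hch'))
      · have hvl : v ∈ children.getD cur [] := by
          rcases (hvis v).mp hv' with h | h
          · exact absurd h hvv
          · exact h
        left; exact (hstk v).mpr (Or.inr ⟨hvl, hvv⟩)

lemma pvLoopB_nodup (children : PySem.Dict String (List String))
    (visited : PySem.Set String) (stack : List String) (count : Int)
    (hnd : visited.Nodup) : (pvLoopB children visited stack count).1.Nodup := by
  revert hnd
  fun_induction pvLoopB children visited stack count with
  | case1 visited count => intro hnd; exact hnd
  | case2 visited count cur rest st ih =>
    intro hnd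
    exact ih (pvStepB_foldl_nodup _ _ hnd)

lemma pvLoopB_count (children : PySem.Dict String (List String))
    (visited : PySem.Set String) (stack : List String) (count : Int) :
    (pvLoopB children visited stack count).2 + (visited.length : Int)
      = count + ((pvLoopB children visited stack count).1.length : Int) := by
  fun_induction pvLoopB children visited stack count with
  | case1 visited count => simp
  | case2 visited count cur rest st ih =>
    have h := pvStepB_foldl_count (children.getD cur []) (visited, rest, count)
    have hst : st = List.foldl pvStepB (visited, rest, count) (children.getD cur []) := rfl
    rw [← hst] at h
    dsimp only at h
    omega

-- ===== VERDICT (by name: the statement is the Claim_ definition above) =====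
theorem count_descendants_spec : Claim_equal_count_descendants := by
  unfold Claim_equal_count_descendants
  intro concepts root _dom hpre
  unfold Spec_count_descendants
  have hAB : ∀ k, (pvChildrenA concepts).getD k [] = (pvChildrenB concepts).getD k [] := by
    intro k; rw [pvChildrenA_getD, pvChildrenB_getD]
  have hguardA : root ∉ (pvChildrenA concepts).getD root [] := by
    rw [pvChildrenA_getD]
    intro hmem
    rcases (pvEdges_mem concepts root root).mp hmem with ⟨_, p, hp, hp1, hbr⟩
    exact hpre p hp hp1 hbr
  have hq0 : ∀ x ∈ [root], x = root ∨ x ∈ (pvChildrenA concepts).values.flatten := by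
    intro x hx; left; simpa using hx
  have hfinal : PySem.Set.len
      (pvLoopA (pvChildrenA concepts) root hguardA PySem.Set.empty [root] hq0)
      = (pvLoopB (pvChildrenB concepts) (PySem.Set.ofList [root]) [root] 0).2 := by
    have hFmem := pvLoopA_mem (pvChildrenA concepts) root hguardA PySem.Set.empty [root] hq0
      (by intro x hx; cases hx)
      (by intro x hx
          have hx' : x = root := by simpa using hx
          subst hx'; exact Relation.ReflTransGen.refl)
      (by intro v hv
          rcases hv with h | rfl
          · cases h
          · exact Or.inl List.mem_cons_self)
    have hFnd := pvLoopA_nodup (pvChildrenA concepts) root hguardA PySem.Set.empty [root] hq0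
      List.nodup_nil
    have hone : PySem.Set.ofList [root] = [root] :=
      PySem.Set.ofList_eq_self_of_nodup _ (List.nodup_singleton root)
    have hVmem := pvLoopB_mem (pvChildrenB concepts) root (PySem.Set.ofList [root]) [root] 0
      (by intro x hx; rw [hone]; exact hx)
      (by intro x hx
          rw [hone] at hx
          have hx' : x = root := by simpa using hx
          subst hx'; exact Relation.ReflTransGen.refl)
      (by rw [hone]; exact List.mem_cons_self)
      (by intro v hv'; rw [hone] at hv'; exact Or.inl hv')
    have hVnd := pvLoopB_nodup (pvChildrenB concepts) (PySem.Set.ofList [root]) [root] 0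
      (by rw [hone]; exact List.nodup_singleton root)
    have hVcnt := pvLoopB_count (pvChildrenB concepts) (PySem.Set.ofList [root]) [root] 0
    have hlen1 : (PySem.Set.ofList [root]).length = 1 := by rw [hone]; rfl
    rw [hlen1] at hVcnt
    have hrootV : root ∈ (pvLoopB (pvChildrenB concepts) (PySem.Set.ofList [root]) [root] 0).1 :=
      (hVmem root).mpr Relation.ReflTransGen.refl
    have hR : ∀ x, pvReach (pvChildrenA concepts) root x ↔ pvReach (pvChildrenB concepts) root x :=
      fun x => pvReach_congr _ _ hAB root x
    have hperm : (pvLoopA (pvChildrenA concepts) root hguardA PySem.Set.empty [root] hq0).Perm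
        ((pvLoopB (pvChildrenB concepts) (PySem.Set.ofList [root]) [root] 0).1.erase root) := by
      rw [List.perm_ext_iff_of_nodup hFnd (hVnd.erase root)]
      intro a
      rw [hFmem a, List.Nodup.mem_erase_iff hVnd, hVmem a, hR a]
      tauto
    have hlen0 : PySem.Set.len
        (pvLoopA (pvChildrenA concepts) root hguardA PySem.Set.empty [root] hq0)
        = ((pvLoopA (pvChildrenA concepts) root hguardA PySem.Set.empty [root] hq0).length : Int) :=
      rfl
    rw [hlen0, hperm.length_eq, List.length_erase_of_mem hrootV]
    have hpos : 0 < (pvLoopB (pvChildrenB concepts) (PySem.Set.ofList [root]) [root] 0).1.length :=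
      List.length_pos_of_mem hrootV
    push_cast at hVcnt
    omega
  unfold count_descendants count_descendants_alt
  rw [dif_neg hguardA]
  exact hfinal
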